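-- pv_equiv track=rewrite | github.com/MOHAMMED1MEDHAT/Hacker-rank-solutions | magic square.py | calcOmiga
-- ===== SOURCE A (Python) =====
-- def calcSum(square):
--     sum=[]
--     sum.append(square[0][0]+square[0][1]+square[0][2])#zero sum
--     sum.append(square[1][0]+square[1][1]+square[1][2])#1 sum
--     sum.append(square[2][0]+square[2][1]+square[2][2])#2 sum
--     sum.append(square[0][0]+square[1][1]+square[2][2])#3 sum
--     sum.append(square[0][2]+square[1][2]+square[2][2])#4 sum
--     sum.append(square[0][1]+square[1][1]+square[2][1])#5 sum
--     sum.append(square[0][0]+square[1][0]+square[2][0])#6 sum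
--     sum.append(square[0][2]+square[1][1]+square[2][0])#7 sum
--     return sum
--
-- def assignLs(square):
--     L=[ [square[0][0],square[0][1],square[0][2]]
--        ,[square[1][0],square[1][1],square[1][2]]
--        ,[square[2][0],square[2][1],square[2][2]]
--        ,[square[0][0],square[1][1],square[2][2]]
--        ,[square[0][2],square[1][2],square[2][2]]
--        ,[square[0][1],square[1][1],square[2][1]]
--        ,[square[0][0],square[1][0],square[2][0]]
--        ,[square[0][2],square[1][1],square[2][0]]]
--     return L
--
-- def calcOmiga(s):
--     omiga=[]
--     som=calcSum
--     sumRows=0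
--     rows=assignLs(s)
--     for item in calcSum(s):
--         for i in range (0,8):
--             for j in range(0,3):
--                 sumRows=sumRows+rows[i][j]
--             W=item-sumRows
--             omiga.append(W)
--             sumRows=0
--     return omiga
-- ===== SOURCE B (Python) =====
-- def calcSum(square):
--     sum=[]
--     sum.append(square[0][0]+square[0][1]+square[0][2])
--     sum.append(square[1][0]+square[1][1]+square[1][2])
--     sum.append(square[2][0]+square[2][1]+square[2][2])
--     sum.append(square[0][0]+square[1][1]+square[2][2])
--     sum.append(square[0][2]+square[1][2]+square[2][2])
--     sum.append(square[0][1]+square[1][1]+square[2][1])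
--     sum.append(square[0][0]+square[1][0]+square[2][0])
--     sum.append(square[0][2]+square[1][1]+square[2][0])
--     return sum
--
-- def calcOmiga(s):
--     sums = calcSum(s)
--     return [a - b for a in sums for b in sums]
-- ===== Notes on version B (the rewrite author's own statement) =====
-- stated objective: simpler
-- what changed: B drops assignLs and the triple-nested loop that re-sums each row for every item: it computes the eight line sums once with calcSum and emits the 64 pairwise differences directly from that table.
import Mathlib
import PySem

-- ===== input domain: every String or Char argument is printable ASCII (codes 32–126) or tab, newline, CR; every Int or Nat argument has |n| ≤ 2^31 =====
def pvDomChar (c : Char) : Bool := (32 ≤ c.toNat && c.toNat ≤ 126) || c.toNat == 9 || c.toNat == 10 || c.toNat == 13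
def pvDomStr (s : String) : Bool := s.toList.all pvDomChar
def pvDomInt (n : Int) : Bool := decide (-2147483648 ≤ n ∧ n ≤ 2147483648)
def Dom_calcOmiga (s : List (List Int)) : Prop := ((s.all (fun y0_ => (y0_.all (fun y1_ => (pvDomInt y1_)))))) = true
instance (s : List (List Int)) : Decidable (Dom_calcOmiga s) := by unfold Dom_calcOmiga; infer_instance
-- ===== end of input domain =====

-- B drops assignLs and the triple-nested re-summation loop: it computes the eight line sums once
-- and builds the 64 differences directly from that table (objective: simpler).

-- ===== PORT A =====
-- square[i][j]; total with default 0 — Pre_calcOmiga excludes exactly the inputs where Python raises IndexError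
def pvGetA (square : List (List Int)) (i j : Int) : Int :=
  (PySem.List.pyGet? ((PySem.List.pyGet? square i).getD []) j).getD 0

def calcSumA (square : List (List Int)) : List Int :=
  let sum : List Int := []
  let sum := sum ++ [pvGetA square 0 0 + pvGetA square 0 1 + pvGetA square 0 2]
  let sum := sum ++ [pvGetA square 1 0 + pvGetA square 1 1 + pvGetA square 1 2]
  let sum := sum ++ [pvGetA square 2 0 + pvGetA square 2 1 + pvGetA square 2 2]
  let sum := sum ++ [pvGetA square 0 0 + pvGetA square 1 1 + pvGetA square 2 2]
  let sum := sum ++ [pvGetA square 0 2 + pvGetA square 1 2 + pvGetA square 2 2]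
  let sum := sum ++ [pvGetA square 0 1 + pvGetA square 1 1 + pvGetA square 2 1]
  let sum := sum ++ [pvGetA square 0 0 + pvGetA square 1 0 + pvGetA square 2 0]
  let sum := sum ++ [pvGetA square 0 2 + pvGetA square 1 1 + pvGetA square 2 0]
  sum

def assignLsA (square : List (List Int)) : List (List Int) :=
  [ [pvGetA square 0 0, pvGetA square 0 1, pvGetA square 0 2]
  , [pvGetA square 1 0, pvGetA square 1 1, pvGetA square 1 2]
  , [pvGetA square 2 0, pvGetA square 2 1, pvGetA square 2 2]
  , [pvGetA square 0 0, pvGetA square 1 1, pvGetA square 2 2]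
  , [pvGetA square 0 2, pvGetA square 1 2, pvGetA square 2 2]
  , [pvGetA square 0 1, pvGetA square 1 1, pvGetA square 2 1]
  , [pvGetA square 0 0, pvGetA square 1 0, pvGetA square 2 0]
  , [pvGetA square 0 2, pvGetA square 1 1, pvGetA square 2 0] ]

def calcOmiga (s : List (List Int)) : List Int :=
  let rows := assignLsA s
  (calcSumA s).foldl (fun omiga item =>
    (PySem.List.pyRange 0 8 1).foldl (fun om i =>
      let sumRows := (PySem.List.pyRange 0 3 1).foldl
        (fun acc j => acc + pvGetA rows i j) 0
      om ++ [item - sumRows]) omiga) []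

-- ===== PORT B =====
def calcSumB (square : List (List Int)) : List Int :=
  let sum : List Int := []
  let sum := sum ++ [pvGetA square 0 0 + pvGetA square 0 1 + pvGetA square 0 2]
  let sum := sum ++ [pvGetA square 1 0 + pvGetA square 1 1 + pvGetA square 1 2]
  let sum := sum ++ [pvGetA square 2 0 + pvGetA square 2 1 + pvGetA square 2 2]
  let sum := sum ++ [pvGetA square 0 0 + pvGetA square 1 1 + pvGetA square 2 2]
  let sum := sum ++ [pvGetA square 0 2 + pvGetA square 1 2 + pvGetA square 2 2]
  let sum := sum ++ [pvGetA square 0 1 + pvGetA square 1 1 + pvGetA square 2 1]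
  let sum := sum ++ [pvGetA square 0 0 + pvGetA square 1 0 + pvGetA square 2 0]
  let sum := sum ++ [pvGetA square 0 2 + pvGetA square 1 1 + pvGetA square 2 0]
  sum

def calcOmiga_alt (s : List (List Int)) : List Int :=
  let sums := calcSumB s
  sums.flatMap (fun a => sums.map (fun b => a - b))

-- ===== PRECONDITION & SPEC =====
-- Pre_ excludes exactly the inputs on which Python A raises IndexError (fewer than three rows,
-- or one of the first three rows shorter than three).
def Pre_calcOmiga (s : List (List Int)) : Prop :=
  3 ≤ s.length ∧ ∀ l ∈ s.take 3, 3 ≤ l.length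
instance (s : List (List Int)) : Decidable (Pre_calcOmiga s) := by unfold Pre_calcOmiga; infer_instance

def pvWitness_calcOmiga : List (List Int) := [[1, 2, 3], [4, 5, 6], [7, 8, 9]]

def Spec_calcOmiga (s : List (List Int)) (out : List Int) : Prop := out = calcOmiga_alt s
instance (s : List (List Int)) (out : List Int) : Decidable (Spec_calcOmiga s out) := by unfold Spec_calcOmiga; infer_instance

-- ===== CLAIM (what is proved, stated in full; the proofs are below) =====
def Claim_equal_calcOmiga : Prop := ∀ (s : List (List Int)), Dom_calcOmiga s → Pre_calcOmiga s → Spec_calcOmiga s (calcOmiga s)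

-- ===== LEMMAS AND PROOFS =====
theorem calcOmiga_eq_alt (s : List (List Int)) : calcOmiga s = calcOmiga_alt s := by
  simp only [calcOmiga, calcOmiga_alt, calcSumA, calcSumB, assignLsA,
    show PySem.List.pyRange 0 8 1 = [0,1,2,3,4,5,6,7] from by decide,
    show PySem.List.pyRange 0 3 1 = [0,1,2] from by decide, List.foldl,
    List.flatMap]
  generalize pvGetA s 0 0 = a00
  generalize pvGetA s 0 1 = a01
  generalize pvGetA s 0 2 = a02
  generalize pvGetA s 1 0 = a10
  generalize pvGetA s 1 1 = a11
  generalize pvGetA s 1 2 = a12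
  generalize pvGetA s 2 0 = a20
  generalize pvGetA s 2 1 = a21
  generalize pvGetA s 2 2 = a22
  simp only [pvGetA, PySem.List.pyGet?, PySem.List.pyIdx?, List.length_cons, List.length_nil,
    show Int.toNat 0 = 0 from rfl, show Int.toNat 1 = 1 from rfl, show Int.toNat 2 = 2 from rfl,
    show Int.toNat 3 = 3 from rfl, show Int.toNat 4 = 4 from rfl, show Int.toNat 5 = 5 from rfl,
    show Int.toNat 6 = 6 from rfl, show Int.toNat 7 = 7 from rfl]
  norm_num [List.getElem_cons_zero, List.getElem_cons_succ, List.getElem?_cons_zero, List.getElem?_cons_succ]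

-- ===== VERDICT (by name: the statement is the Claim_ definition above) =====
theorem calcOmiga_spec : Claim_equal_calcOmiga := by
  intro s _ _
  exact (calcOmiga_eq_alt s).symm ▸ rfl
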